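-- pv_equiv track=rewrite | github.com/wanghaizhou/AdventOfCode | adventofcode/2023/day11/day11.py | expandLine
-- ===== SOURCE A (Python) =====
-- def expandLine(list_str,lineToExpand):
--     length = len(list_str[0])
--     result = []
--     for row in list_str:
--         list_row = list(row)
--         result_row = []
--         for i in range(len(list_row)):
--             result_row.append(list_row[i])
--             if i in lineToExpand:
--                 result_row.append(list_row[i])
--         result.append(result_row)
--     return result
--     pass
-- ===== SOURCE B (Python) =====
-- def expandLine(list_str, lineToExpand):
--     valid = sorted({i for i in lineToExpand if i >= 0})
--     result = []
--     for row in list_str: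
--         chars = list(row)
--         n = len(chars)
--         out = []
--         prev = 0
--         for idx in valid:
--             if idx >= n:
--                 break
--             out.extend(chars[prev:idx])
--             out.append(chars[idx])
--             out.append(chars[idx])
--             prev = idx + 1
--         out.extend(chars[prev:])
--         result.append(out)
--     return result
-- ===== Notes on version B (the rewrite author's own statement) =====
-- stated objective: alternative
-- what changed: B precomputes the sorted distinct non-negative expansion indices once and builds each output row by slicing between those breakpoints, instead of A's per-character membership test over lineToExpand.
import Mathlib
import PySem

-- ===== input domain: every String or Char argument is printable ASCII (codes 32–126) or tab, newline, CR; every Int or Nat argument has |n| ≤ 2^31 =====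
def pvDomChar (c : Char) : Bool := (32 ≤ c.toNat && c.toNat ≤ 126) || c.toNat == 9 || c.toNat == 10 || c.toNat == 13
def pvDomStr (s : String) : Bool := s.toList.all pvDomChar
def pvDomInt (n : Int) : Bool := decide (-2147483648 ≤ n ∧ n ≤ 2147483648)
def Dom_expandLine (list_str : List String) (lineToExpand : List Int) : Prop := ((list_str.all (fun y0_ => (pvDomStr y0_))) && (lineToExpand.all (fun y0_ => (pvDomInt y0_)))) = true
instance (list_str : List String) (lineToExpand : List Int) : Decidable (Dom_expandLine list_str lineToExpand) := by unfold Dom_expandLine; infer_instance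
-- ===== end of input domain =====

-- B duplicates the expansion columns by slicing each row between the sorted distinct
-- non-negative expansion indices instead of testing membership at every character
-- (objective: alternative decomposition). B returns [] where A raises on empty input.

-- ===== PORT A =====
def expandLine (list_str : List String) (lineToExpand : List Int) : List (List String) :=
  list_str.foldl (fun result row =>
    let list_row := row.toList.map (fun c => String.ofList [c])
    let result_row := (List.range list_row.length).foldl (fun result_row (i : Nat) =>
      let result_row := result_row ++ [list_row.getD i ""]
      if (i : Int) ∈ lineToExpand then result_row ++ [list_row.getD i ""] else result_row) []
    result ++ [result_row]) []

-- ===== PORT B =====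
-- the inner 'for idx in valid' loop of Source B (with its break), as structural recursion on valid
def pvWalk (chars : List String) (n : Int) (prev : Int) (out : List String) : List Int → List String
  | [] => out ++ PySem.List.slice chars (some prev) none
  | idx :: rest =>
    if idx ≥ n then out ++ PySem.List.slice chars (some prev) none
    else pvWalk chars n (idx + 1)
      (out ++ PySem.List.slice chars (some prev) (some idx)
           ++ [PySem.List.pyGetD chars idx "", PySem.List.pyGetD chars idx ""]) rest

def expandLine_alt (list_str : List String) (lineToExpand : List Int) : List (List String) :=
  let valid := PySem.List.sorted (PySem.Set.ofList (lineToExpand.filter (fun i => decide (0 ≤ i)))) (fun x => x) false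
  list_str.foldl (fun result row =>
    let chars := row.toList.map (fun c => String.ofList [c])
    result ++ [pvWalk chars (chars.length : Int) 0 [] valid]) []

-- ===== PRECONDITION & SPEC =====
-- Pre_ excludes only the empty grid, on which A raises IndexError at len(list_str[0]).
def Pre_expandLine (list_str : List String) (lineToExpand : List Int) : Prop := list_str ≠ []
instance (list_str : List String) (lineToExpand : List Int) : Decidable (Pre_expandLine list_str lineToExpand) := by unfold Pre_expandLine; infer_instance
def pvWitness_expandLine : List String × List Int := (["ab#", ".b."], [0, 2])

def Spec_expandLine (list_str : List String) (lineToExpand : List Int) (out : List (List String)) : Prop := out = expandLine_alt list_str lineToExpand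
instance (list_str : List String) (lineToExpand : List Int) (out : List (List String)) : Decidable (Spec_expandLine list_str lineToExpand out) := by unfold Spec_expandLine; infer_instance

-- ===== CLAIM (what is proved, stated in full; the proofs are below) =====
def Claim_equal_expandLine : Prop := ∀ (list_str : List String) (lineToExpand : List Int), Dom_expandLine list_str lineToExpand → Pre_expandLine list_str lineToExpand → Spec_expandLine list_str lineToExpand (expandLine list_str lineToExpand)


-- ===== LEMMAS AND PROOFS =====

-- the per-index segment A builds from column a to the end of the row
def pvSeg (chars : List String) (lte : List Int) (a : Nat) : List String :=
  (List.range' a (chars.length - a)).flatMap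
    (fun i => (chars.getD i "") :: (if (i : Int) ∈ lte then [chars.getD i ""] else []))

lemma pv_flatMap_seg (chars : List String) (lte : List Int) :
    ∀ (k a : Nat), a + k ≤ chars.length →
      (∀ i : Nat, a ≤ i → i < a + k → (i : Int) ∉ lte) →
      (List.range' a k).flatMap
        (fun i => (chars.getD i "") :: (if (i : Int) ∈ lte then [chars.getD i ""] else []))
      = (chars.drop a).take k := by
  intro k
  induction k with
  | zero => intro a _ _; simp
  | succ k ih =>
    intro a hk h
    have ha : a < chars.length := by omega
    rw [List.range'_succ, List.flatMap_cons, if_neg (h a le_rfl (by omega)),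
        ih (a + 1) (by omega) (fun i h1 h2 => h i (by omega) (by omega)),
        List.drop_eq_getElem_cons ha, List.take_succ_cons]
    simp [List.getD_eq_getElem?_getD, ha]

lemma pv_seg_no_mem (chars : List String) (lte : List Int) (a : Nat)
    (ha : a ≤ chars.length)
    (h : ∀ i : Nat, a ≤ i → i < chars.length → (i : Int) ∉ lte) :
    pvSeg chars lte a = chars.drop a := by
  unfold pvSeg
  rw [pv_flatMap_seg chars lte (chars.length - a) a (by omega)
      (fun i h1 h2 => h i h1 (by omega))]
  exact List.take_of_length_le (by simp)

lemma pv_seg_split (chars : List String) (lte : List Int) (a j : Nat)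
    (haj : a ≤ j) (hj : j < chars.length)
    (hmid : ∀ i : Nat, a ≤ i → i < j → (i : Int) ∉ lte)
    (hjmem : (j : Int) ∈ lte) :
    pvSeg chars lte a =
      (chars.drop a).take (j - a) ++ [chars.getD j "", chars.getD j ""] ++ pvSeg chars lte (j + 1) := by
  unfold pvSeg
  have h1 : chars.length - a = (j - a) + (chars.length - j) := by omega
  have hsplit : List.range' a (chars.length - a)
      = List.range' a (j - a) ++ List.range' j (chars.length - j) := by
    rw [h1, ← List.range'_append, show a + 1 * (j - a) = j from by omega]
  rw [hsplit, List.flatMap_append,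
      pv_flatMap_seg chars lte (j - a) a (by omega) (fun i hi1 hi2 => hmid i hi1 (by omega)),
      show chars.length - j = (chars.length - (j + 1)) + 1 from by omega,
      List.range'_succ, List.flatMap_cons, if_pos hjmem]
  simp [List.append_assoc]

lemma pv_walk_spec (chars : List String) (lte : List Int) :
    ∀ (valid : List Int) (a : Nat) (out : List String),
      a ≤ chars.length →
      valid.Pairwise (· < ·) →
      (∀ x ∈ valid, (a : Int) ≤ x) →
      (∀ i : Nat, a ≤ i → i < chars.length → ((i : Int) ∈ valid ↔ (i : Int) ∈ lte)) →
      pvWalk chars (chars.length : Int) (a : Int) out valid = out ++ pvSeg chars lte a := by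
  intro valid
  induction valid with
  | nil =>
    intro a out ha _ _ hmem
    simp only [pvWalk]
    rw [PySem.List.slice_from_natCast,
        pv_seg_no_mem chars lte a ha (fun i h1 h2 hin => by
          have := (hmem i h1 h2).mpr hin; simp at this)]
  | cons idx rest ih =>
    intro a out ha hpw hlb hmem
    rcases List.pairwise_cons.mp hpw with ⟨hhead, hpw'⟩
    simp only [pvWalk]
    by_cases hge : idx ≥ (chars.length : Int)
    · rw [if_pos hge, PySem.List.slice_from_natCast,
          pv_seg_no_mem chars lte a ha (fun i h1 h2 hin => by
            rcases List.mem_cons.mp ((hmem i h1 h2).mpr hin) with heq | hr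
            · omega
            · have := hhead _ hr; omega)]
    · rw [if_neg hge]
      have h0 : (0 : Int) ≤ idx := le_trans (Int.natCast_nonneg a) (hlb idx (by simp))
      obtain ⟨j, hj⟩ : ∃ j : Nat, (j : Int) = idx := ⟨idx.toNat, Int.toNat_of_nonneg h0⟩
      subst hj
      have hjlen : j < chars.length := by omega
      have haj : a ≤ j := by have := hlb (j : Int) (by simp); omega
      have hmem_j : (j : Int) ∈ lte := (hmem j haj hjlen).mp (by simp)
      rw [PySem.List.slice_natCast, PySem.List.pyGetD_natCast,
          show ((j : Int) + 1) = (((j + 1 : Nat) : Nat) : Int) from by push_cast; ring,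
          ih (j + 1) _ (by omega) hpw'
            (fun x hx => by have := hhead x hx; omega)
            (fun i h1 h2 => by
              have hne : (i : Int) ≠ (j : Int) := by omega
              constructor
              · intro hr; exact (hmem i (by omega) h2).mp (List.mem_cons_of_mem _ hr)
              · intro hl
                rcases List.mem_cons.mp ((hmem i (by omega) h2).mpr hl) with heq | hr
                · exact absurd heq hne
                · exact hr),
          pv_seg_split chars lte a j haj hjlen
            (fun i h1 h2 hin => by
              rcases List.mem_cons.mp ((hmem i h1 (by omega)).mpr hin) with heq | hr
              · omega
              · have := hhead _ hr; omega)
            hmem_j]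
      simp [List.append_assoc]

lemma pv_inner_eq (chars : List String) (lte : List Int) :
    (List.range chars.length).foldl (fun result_row (i : Nat) =>
      let result_row := result_row ++ [chars.getD i ""]
      if (i : Int) ∈ lte then result_row ++ [chars.getD i ""] else result_row) []
    = pvWalk chars (chars.length : Int) 0 []
        (PySem.List.sorted (PySem.Set.ofList (lte.filter (fun i => decide (0 ≤ i)))) (fun x => x) false) := by
  set valid := PySem.List.sorted (PySem.Set.ofList (lte.filter (fun i => decide (0 ≤ i)))) (fun x => x) false with hv
  have hg : (List.range chars.length).foldl (fun result_row (i : Nat) =>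
      let result_row := result_row ++ [chars.getD i ""]
      if (i : Int) ∈ lte then result_row ++ [chars.getD i ""] else result_row) ([] : List String)
      = (List.range chars.length).foldl
        (fun acc (i : Nat) => acc ++ ((chars.getD i "") :: (if (i : Int) ∈ lte then [chars.getD i ""] else []))) [] := by
    apply PySem.List.foldl_congr_mem
    intro acc i _
    by_cases hm : (i : Int) ∈ lte <;> simp [hm]
  have hpw : valid.Pairwise (· < ·) := by
    rw [hv]; exact PySem.List.sorted_ofList_pairwise_lt _
  have hlb : ∀ x ∈ valid, ((0 : Nat) : Int) ≤ x := by
    intro x hx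
    have : x ∈ lte ∧ 0 ≤ x := by
      simpa [hv, PySem.List.mem_sorted, PySem.Set.mem_ofList, List.mem_filter] using hx
    exact_mod_cast this.2
  have hmem : ∀ i : Nat, 0 ≤ i → i < chars.length → ((i : Int) ∈ valid ↔ (i : Int) ∈ lte) := by
    intro i _ _
    simp [hv, PySem.List.mem_sorted, PySem.Set.mem_ofList, List.mem_filter]
  have hw := pv_walk_spec chars lte valid 0 [] (Nat.zero_le _) hpw hlb hmem
  rw [hg, PySem.List.foldl_append_eq_flatMap]
  rw [show ((0 : Nat) : Int) = (0 : Int) from rfl] at hw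
  rw [hw]
  simp [pvSeg, List.range_eq_range']

-- ===== VERDICT (by name: the statement is the Claim_ definition above) =====
theorem expandLine_spec : Claim_equal_expandLine := by
  intro list_str lte _ _
  simp only [Spec_expandLine, expandLine, expandLine_alt]
  rw [PySem.List.foldl_append_singleton_eq_map, PySem.List.foldl_append_singleton_eq_map]
  simp only [List.nil_append]
  exact List.map_congr_left (fun row _ => pv_inner_eq (row.toList.map (fun c => String.ofList [c])) lte)
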